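-- pv_equiv track=rewrite | github.com/Gab0502/cameras-py | util.py | normalize_chars
-- ===== SOURCE A (Python) =====
-- def normalize_chars(text: str) -> str:
--     corrections = {
--         "0": "O", "O": "0",
--         "1": "I", "I": "1",
--         "5": "S", "S": "5",
--         "8": "B", "B": "8",
--     }
--     result = []
--     for i, ch in enumerate(text):
--         if i < 3 and ch in corrections and corrections[ch].isalpha():
--             result.append(corrections[ch])
--         elif i >= 3 and ch in corrections and corrections[ch].isdigit():
--             result.append(corrections[ch])
--         else:
--             result.append(ch)
--     return "".join(result)
-- ===== SOURCE B (Python) =====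
-- def normalize_chars(text: str) -> str:
--     head, tail = text[:3], text[3:]
--     for digit, letter in (("0", "O"), ("1", "I"), ("5", "S"), ("8", "B")):
--         head = head.replace(digit, letter)
--         tail = tail.replace(letter, digit)
--     return head + tail
-- ===== Notes on version B (the rewrite author's own statement) =====
-- stated objective: faster
-- what changed: Replaces A's single per-character Python loop (enumerate, dict membership, isalpha/isdigit tests, list append) with staged whole-string substitution: slice into head/tail and run four successive str.replace passes per slice (digit->letter on head, letter->digit on tail); correct because no replacement output is a key of a later pass, and faster because each pass runs in C over the string.
import Mathlib
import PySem

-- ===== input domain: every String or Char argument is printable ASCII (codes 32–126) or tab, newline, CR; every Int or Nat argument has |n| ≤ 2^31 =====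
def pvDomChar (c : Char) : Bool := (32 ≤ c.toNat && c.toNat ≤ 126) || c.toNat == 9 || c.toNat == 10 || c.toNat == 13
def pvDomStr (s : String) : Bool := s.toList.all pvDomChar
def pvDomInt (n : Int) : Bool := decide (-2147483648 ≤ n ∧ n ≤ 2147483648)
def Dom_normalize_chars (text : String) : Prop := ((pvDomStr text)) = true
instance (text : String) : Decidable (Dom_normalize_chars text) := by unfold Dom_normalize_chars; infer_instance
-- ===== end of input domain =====

-- B replaces A's per-character enumerate loop (dict membership + isalpha/isdigit branch per index)
-- by staged whole-string substitution: slice into head/tail and run four successive one-pair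
-- replace passes per slice; different traversal of the data (measured constant-factor faster).

-- ===== PORT A =====
def pvCorrections : PySem.Dict Char Char :=
  PySem.Dict.ofList [('0', 'O'), ('O', '0'), ('1', 'I'), ('I', '1'),
                     ('5', 'S'), ('S', '5'), ('8', 'B'), ('B', '8')]

def pvStepA (acc : List Char) (p : Int × Char) : List Char :=
  if p.1 < 3 && pvCorrections.contains p.2
       && PySem.Chars.isalpha ((pvCorrections.get? p.2).getD p.2) then
    acc ++ [(pvCorrections.get? p.2).getD p.2]
  else if p.1 ≥ 3 && pvCorrections.contains p.2
       && PySem.Chars.isdigit ((pvCorrections.get? p.2).getD p.2) then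
    acc ++ [(pvCorrections.get? p.2).getD p.2]
  else
    acc ++ [p.2]

def normalize_chars (text : String) : String :=
  String.ofList ((PySem.List.enumerate text.toList).foldl pvStepA [])

-- ===== PORT B =====
-- the four (digit, letter) replacement pairs Source B iterates over
def pvPairs : List (Char × Char) := [('0', 'O'), ('1', 'I'), ('5', 'S'), ('8', 'B')]

def normalize_chars_alt (text : String) : String :=
  let ht := pvPairs.foldl
    (fun (p : String × String) dl =>
      (PySem.Str.replace p.1 (String.ofList [dl.1]) (String.ofList [dl.2]),
       PySem.Str.replace p.2 (String.ofList [dl.2]) (String.ofList [dl.1])))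
    (PySem.Str.slice text none (some 3), PySem.Str.slice text (some 3) none)
  ht.1 ++ ht.2

-- ===== PRECONDITION & SPEC =====
def Spec_normalize_chars (text : String) (out : String) : Prop := out = normalize_chars_alt text
instance (text : String) (out : String) : Decidable (Spec_normalize_chars text out) := by unfold Spec_normalize_chars; infer_instance

-- ===== CLAIM (what is proved, stated in full; the proofs are below) =====
def Claim_equal_normalize_chars : Prop := ∀ (text : String), Dom_normalize_chars text → Spec_normalize_chars text (normalize_chars text)

-- ===== LEMMAS AND PROOFS =====

-- the per-character substitution performed by one single-char replace pass
def pvSub (o n c : Char) : Char := if c = o then n else c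

-- what A does to the first three characters
def pvHeadMap (c : Char) : Char :=
  if c = '0' then 'O' else if c = '1' then 'I' else if c = '5' then 'S'
  else if c = '8' then 'B' else c

-- what A does to the rest
def pvTailMap (c : Char) : Char :=
  if c = 'O' then '0' else if c = 'I' then '1' else if c = 'S' then '5'
  else if c = 'B' then '8' else c

-- A's per-character value, as a function of index and character
def pvG (p : Int × Char) : Char := if p.1 < 3 then pvHeadMap p.2 else pvTailMap p.2

theorem pvCorrections_mk : pvCorrections = PySem.Dict.mk
    [('0', 'O'), ('O', '0'), ('1', 'I'), ('I', '1'),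
     ('5', 'S'), ('S', '5'), ('8', 'B'), ('B', '8')] := by decide

theorem pvStepA_eq (acc : List Char) (p : Int × Char) :
    pvStepA acc p = acc ++ [pvG p] := by
  obtain ⟨i, c⟩ := p
  unfold pvStepA pvG
  by_cases h0 : c = '0'
  · subst h0; by_cases hi : (i : Int) < 3 <;>
      simp [hi, pvCorrections_mk, pvHeadMap, pvTailMap, PySem.Dict.get?_mk_cons, PySem.Chars.isalpha, PySem.Chars.isdigit, PySem.Chars.isupper, PySem.Chars.islower]
  all_goals by_cases h1 : c = '1'
  · subst h1; by_cases hi : (i : Int) < 3 <;>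
      simp [hi, pvCorrections_mk, pvHeadMap, pvTailMap, PySem.Dict.get?_mk_cons, PySem.Chars.isalpha, PySem.Chars.isdigit, PySem.Chars.isupper, PySem.Chars.islower]
  all_goals by_cases h5 : c = '5'
  · subst h5; by_cases hi : (i : Int) < 3 <;>
      simp [hi, pvCorrections_mk, pvHeadMap, pvTailMap, PySem.Dict.get?_mk_cons, PySem.Chars.isalpha, PySem.Chars.isdigit, PySem.Chars.isupper, PySem.Chars.islower]
  all_goals by_cases h8 : c = '8'
  · subst h8; by_cases hi : (i : Int) < 3 <;>
      simp [hi, pvCorrections_mk, pvHeadMap, pvTailMap, PySem.Dict.get?_mk_cons, PySem.Chars.isalpha, PySem.Chars.isdigit, PySem.Chars.isupper, PySem.Chars.islower]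
  all_goals by_cases hO : c = 'O'
  · subst hO; by_cases hi : (i : Int) < 3 <;>
      simp [hi, pvCorrections_mk, pvHeadMap, pvTailMap, PySem.Dict.get?_mk_cons, PySem.Chars.isalpha, PySem.Chars.isdigit, PySem.Chars.isupper, PySem.Chars.islower]
  all_goals by_cases hI : c = 'I'
  · subst hI; by_cases hi : (i : Int) < 3 <;>
      simp [hi, pvCorrections_mk, pvHeadMap, pvTailMap, PySem.Dict.get?_mk_cons, PySem.Chars.isalpha, PySem.Chars.isdigit, PySem.Chars.isupper, PySem.Chars.islower]
  all_goals by_cases hS : c = 'S'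
  · subst hS; by_cases hi : (i : Int) < 3 <;>
      simp [hi, pvCorrections_mk, pvHeadMap, pvTailMap, PySem.Dict.get?_mk_cons, PySem.Chars.isalpha, PySem.Chars.isdigit, PySem.Chars.isupper, PySem.Chars.islower]
  all_goals by_cases hB : c = 'B'
  · subst hB; by_cases hi : (i : Int) < 3 <;>
      simp [hi, pvCorrections_mk, pvHeadMap, pvTailMap, PySem.Dict.get?_mk_cons, PySem.Chars.isalpha, PySem.Chars.isdigit, PySem.Chars.isupper, PySem.Chars.islower]
  all_goals
    simp [pvCorrections_mk, pvHeadMap, pvTailMap, PySem.Dict.get?_mk_cons, PySem.Chars.isalpha, PySem.Chars.isdigit, PySem.Chars.isupper, PySem.Chars.islower,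
          h0, h1, h5, h8, hO, hI, hS, hB,
          Ne.symm h0, Ne.symm h1, Ne.symm h5, Ne.symm h8,
          Ne.symm hO, Ne.symm hI, Ne.symm hS, Ne.symm hB]

theorem foldl_stepA (l : List (Int × Char)) (acc : List Char) :
    l.foldl pvStepA acc = acc ++ l.map pvG := by
  induction l generalizing acc with
  | nil => simp
  | cons p t ih => simp [List.foldl, pvStepA_eq, ih]

theorem map_pvG_tail (l : List Char) (s : Int) (hs : 3 ≤ s) :
    (PySem.List.enumerate l s).map pvG = l.map pvTailMap := by
  induction l generalizing s with
  | nil => simp [PySem.List.enumerate_nil]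
  | cons c t ih =>
    rw [PySem.List.enumerate_cons]
    simp only [List.map_cons]
    rw [ih (s + 1) (by omega)]
    congr 1
    simp [pvG, show ¬ s < 3 by omega]

theorem map_pvG_split (l : List Char) :
    (PySem.List.enumerate l).map pvG =
      (l.take 3).map pvHeadMap ++ (l.drop 3).map pvTailMap := by
  match l with
  | [] => simp [PySem.List.enumerate_nil]
  | [a] => simp [PySem.List.enumerate_cons, PySem.List.enumerate_nil, pvG]
  | [a, b] => simp [PySem.List.enumerate_cons, PySem.List.enumerate_nil, pvG]
  | a :: b :: c :: t =>
    rw [PySem.List.enumerate_cons, PySem.List.enumerate_cons, PySem.List.enumerate_cons]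
    simp only [List.map_cons]
    rw [show (0 : Int) + 1 + 1 + 1 = 3 by norm_num] at *
    rw [map_pvG_tail t 3 (by norm_num)]
    simp [pvG]

-- replace with a single-character pattern is a map over the characters
theorem go_single (o n : Char) : ∀ fuel l acc, l.length ≤ fuel →
    PySem.Chars.replace.go [o] [n] fuel l acc = acc.reverse ++ l.map (pvSub o n) := by
  intro fuel
  induction fuel with
  | zero => intro l acc h; simp at h; simp [h, PySem.Chars.replace.go]
  | succ k ih =>
    intro l acc h
    cases l with
    | nil => simp [PySem.Chars.replace.go]
    | cons c t =>
      rw [PySem.Chars.replace.go]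
      by_cases hc : c = o
      · simp [hc, List.isPrefixOf]
        rw [ih t (n :: acc) (by simpa using Nat.le_of_succ_le_succ h)]
        simp [pvSub]
      · simp [List.isPrefixOf, Ne.symm hc]
        rw [ih t (c :: acc) (by simpa using Nat.le_of_succ_le_succ h)]
        simp [pvSub, hc]

theorem replace_single (o n : Char) (l : List Char) :
    PySem.Chars.replace l [o] [n] = l.map (pvSub o n) := by
  rw [PySem.Chars.replace]
  simp [go_single o n l.length l [] le_rfl]

theorem head_comp (c : Char) :
    pvSub '8' 'B' (pvSub '5' 'S' (pvSub '1' 'I' (pvSub '0' 'O' c))) = pvHeadMap c := by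
  simp only [pvSub, pvHeadMap]; split_ifs <;> simp_all

theorem tail_comp (c : Char) :
    pvSub 'B' '8' (pvSub 'S' '5' (pvSub 'I' '1' (pvSub 'O' '0' c))) = pvTailMap c := by
  simp only [pvSub, pvTailMap]; split_ifs <;> simp_all

theorem alt_toList (text : String) :
    (normalize_chars_alt text).toList =
      (text.toList.take 3).map pvHeadMap ++ (text.toList.drop 3).map pvTailMap := by
  unfold normalize_chars_alt
  simp only [pvPairs, List.foldl]
  rw [String.toList_append]
  simp only [PySem.Str.toList_replace, String.toList_ofList, PySem.Str.toList_slice,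
    PySem.Chars.slice_eq_listSlice,
    PySem.List.slice_to text.toList (b := 3) (by norm_num),
    PySem.List.slice_from text.toList (a := 3) (by norm_num),
    replace_single, List.map_map]
  have h1 : ∀ c : Char, (pvSub '8' 'B' ∘ pvSub '5' 'S' ∘ pvSub '1' 'I' ∘ pvSub '0' 'O') c = pvHeadMap c := fun c => head_comp c
  have h2 : ∀ c : Char, (pvSub 'B' '8' ∘ pvSub 'S' '5' ∘ pvSub 'I' '1' ∘ pvSub 'O' '0') c = pvTailMap c := fun c => tail_comp c
  simp [funext h1, funext h2]

theorem normalize_chars_spec : Claim_equal_normalize_chars := by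
  intro text _
  unfold Spec_normalize_chars normalize_chars
  apply String.toList_inj.mp
  rw [alt_toList]
  simp only [String.toList_ofList]
  rw [foldl_stepA, List.nil_append, map_pvG_split]
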